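-- pv_equiv track=rewrite | github.com/ravnoorsingh/MediRag | clinical_decision_engine.py | _create_evidence_excerpt
-- ===== SOURCE A (Python) =====
-- def _create_evidence_excerpt(content: str, query_context: str) -> str:
--     """Create a relevant excerpt from content based on query context"""
--     if not content:
--         return "No content available"
--
--     # If content is short, return as is
--     if len(content) <= 300:
--         return content
--
--     # Try to find relevant sections based on query keywords
--     query_keywords = query_context.lower().split()
--     content_lower = content.lower()
--
--     # Find best starting position based on keyword matches
--     best_pos = 0
--     max_matches = 0
--
--     for i in range(0, len(content) - 300, 50):
--         excerpt = content[i:i+300].lower()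
--         matches = sum(1 for keyword in query_keywords if keyword in excerpt)
--         if matches > max_matches:
--             max_matches = matches
--             best_pos = i
--
--     excerpt = content[best_pos:best_pos+300]
--     return excerpt + "..." if best_pos + 300 < len(content) else excerpt
-- ===== SOURCE B (Python) =====
-- def _create_evidence_excerpt(content: str, query_context: str) -> str:
--     """Create a relevant excerpt from content based on query context.
--
--     Index-based rewrite: lowercase the content once, build a keyword ->
--     match-positions index, then score each candidate window against the
--     index instead of slicing and lowercasing the window and re-scanning
--     it for every keyword.
--     """
--     if not content:
--         return "No content available"
--     n = len(content)
--     if n <= 300: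
--         return content
--
--     cl = content.lower()
--     keywords = query_context.lower().split()
--
--     # index: for each distinct keyword, every start position where it matches
--     index = {}
--     for kw in keywords:
--         if kw not in index:
--             index[kw] = [p for p in range(n - len(kw) + 1) if cl.startswith(kw, p)]
--
--     best_pos, best = 0, 0
--     for i in range(0, n - 300, 50):
--         m = sum(1 for kw in keywords
--                 if any(i <= p and p + len(kw) <= i + 300 for p in index[kw]))
--         if m > best:
--             best, best_pos = m, i
--
--     excerpt = content[best_pos:best_pos + 300]
--     return excerpt + "..." if best_pos + 300 < n else excerpt
-- ===== Notes on version B (the rewrite author's own statement) =====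
-- stated objective: alternative
-- what changed: Instead of slicing out and lowercasing every 300-char window and re-scanning it for each keyword, B lowercases the content once, builds a keyword-to-match-positions index (computed once per distinct keyword), and scores each window start by checking the index for an occurrence that fits fully inside the window.
import Mathlib
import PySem

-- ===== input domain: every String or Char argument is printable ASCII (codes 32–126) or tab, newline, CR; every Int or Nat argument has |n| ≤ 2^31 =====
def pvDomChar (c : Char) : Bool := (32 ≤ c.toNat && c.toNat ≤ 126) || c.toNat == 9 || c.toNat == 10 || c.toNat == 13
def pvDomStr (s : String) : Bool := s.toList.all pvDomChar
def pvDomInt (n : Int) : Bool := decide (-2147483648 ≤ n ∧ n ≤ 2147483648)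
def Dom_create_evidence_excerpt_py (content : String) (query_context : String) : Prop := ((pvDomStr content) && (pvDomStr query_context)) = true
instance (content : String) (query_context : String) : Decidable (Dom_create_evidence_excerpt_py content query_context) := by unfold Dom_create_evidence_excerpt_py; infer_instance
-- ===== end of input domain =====

-- B replaces A's per-window slice+lower+substring-scan by a keyword→match-positions index
-- built once over the lowercased content (objective: alternative decomposition, not speed).

-- ===== PORT A =====
def create_evidence_excerpt_py (content : String) (query_context : String) : String :=
  if content.toList.isEmpty then "No content available"
  else if PySem.Str.len content ≤ 300 then content
  else
    let query_keywords := PySem.Str.split₀ (PySem.Str.lower query_context)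
    let _content_lower := PySem.Str.lower content   -- A computes this local but never uses it
    let st := (PySem.List.pyRange 0 (PySem.Str.len content - 300) 50).foldl
      (fun (st : Int × Int) i =>
        let excerpt := PySem.Str.lower (PySem.Str.slice content (some i) (some (i + 300)))
        let nmatches := (query_keywords.map
          (fun kw => if PySem.Str.isIn kw excerpt then (1 : Int) else 0)).sum
        if nmatches > st.2 then (i, nmatches) else st) (0, 0)
    let excerpt := PySem.Str.slice content (some st.1) (some (st.1 + 300))
    if st.1 + 300 < PySem.Str.len content then excerpt ++ "..." else excerpt

-- ===== PORT B =====
-- [p for p in range(len(cl) - len(kw) + 1) if cl.startswith(kw, p)]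
-- (cl.startswith(kw, p) ported by hand as kw.toList <+: cl.toList.drop p.toNat, exact for 0 ≤ p ≤ len cl)
def pyMatchPositions (cl : String) (kw : String) : List Int :=
  (PySem.List.pyRange 0 (PySem.Str.len cl - PySem.Str.len kw + 1)).filter
    (fun p => PySem.Chars.startswith (cl.toList.drop p.toNat) kw.toList)

def create_evidence_excerpt_py_alt (content : String) (query_context : String) : String :=
  if content.toList.isEmpty then "No content available"
  else if PySem.Str.len content ≤ 300 then content
  else
    let n := PySem.Str.len content
    let cl := PySem.Str.lower content
    let keywords := PySem.Str.split₀ (PySem.Str.lower query_context)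
    let index : PySem.Dict String (List Int) := keywords.foldl
      (fun d kw => if d.contains kw then d else d.insert kw (pyMatchPositions cl kw))
      PySem.Dict.empty
    let st := (PySem.List.pyRange 0 (n - 300) 50).foldl
      (fun (st : Int × Int) i =>
        let m := (keywords.map (fun kw =>
          if (index.getD kw []).any
              (fun p => decide (i ≤ p) && decide (p + PySem.Str.len kw ≤ i + 300))
            then (1 : Int) else 0)).sum
        if m > st.2 then (i, m) else st) (0, 0)
    let excerpt := PySem.Str.slice content (some st.1) (some (st.1 + 300))
    if st.1 + 300 < n then excerpt ++ "..." else excerpt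

-- ===== PRECONDITION & SPEC =====
def Spec_create_evidence_excerpt_py (content : String) (query_context : String) (out : String) : Prop := out = create_evidence_excerpt_py_alt content query_context
instance (content : String) (query_context : String) (out : String) : Decidable (Spec_create_evidence_excerpt_py content query_context out) := by unfold Spec_create_evidence_excerpt_py; infer_instance

-- ===== CLAIM (what is proved, stated in full; the proofs are below) =====
def Claim_equal_create_evidence_excerpt_py : Prop := ∀ (content : String) (query_context : String), Dom_create_evidence_excerpt_py content query_context → Spec_create_evidence_excerpt_py content query_context (create_evidence_excerpt_py content query_context)

-- ===== LEMMAS AND PROOFS =====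

-- every key the index-building fold has stored maps to its match-position list
lemma idx_getD (cl : String) (l : List String) (d : PySem.Dict String (List Int))
    (h : ∀ k, d.contains k = true → d.getD k [] = pyMatchPositions cl k) :
    ∀ k, (l.foldl (fun d kw => if d.contains kw then d
            else d.insert kw (pyMatchPositions cl kw)) d).contains k = true →
      (l.foldl (fun d kw => if d.contains kw then d
            else d.insert kw (pyMatchPositions cl kw)) d).getD k [] = pyMatchPositions cl k := by
  induction l generalizing d with
  | nil => simpa using h
  | cons kw t ih =>
    intro k
    simp only [List.foldl_cons]
    by_cases hc : d.contains kw
    · rw [if_pos hc]; exact ih d h k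
    · rw [if_neg hc]
      refine ih _ ?_ k
      intro k' hk'
      rw [PySem.Dict.contains_insert] at hk'
      rw [PySem.Dict.getD_insert]
      rw [Bool.or_eq_true] at hk'
      rcases hk' with h1 | h1
      · have hkk : k' = kw := eq_of_beq h1
        rw [if_pos hkk, hkk]
      · have hne : ¬ k' = kw := fun he => hc (he ▸ h1)
        rw [if_neg hne]; exact h k' h1

-- every keyword of the list ends up stored in the index
lemma idx_contains (cl : String) (l : List String) (d : PySem.Dict String (List Int))
    (k : String) (hk : k ∈ l ∨ d.contains k = true) :
    (l.foldl (fun d kw => if d.contains kw then d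
        else d.insert kw (pyMatchPositions cl kw)) d).contains k = true := by
  induction l generalizing d with
  | nil => simpa using hk.resolve_left (by simp)
  | cons kw t ih =>
    simp only [List.foldl_cons]
    by_cases hc : d.contains kw
    · rw [if_pos hc]
      refine ih d ?_
      rcases hk with hk | hk
      · rcases List.mem_cons.mp hk with he | ht
        · rw [he]; exact Or.inr hc
        · exact Or.inl ht
      · exact Or.inr hk
    · rw [if_neg hc]
      refine ih _ ?_
      rcases hk with hk | hk
      · rcases List.mem_cons.mp hk with he | ht
        · rw [he]; exact Or.inr (PySem.Dict.contains_insert_self d kw _)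
        · exact Or.inl ht
      · exact Or.inr (by rw [PySem.Dict.contains_insert, hk]; simp)

-- a keyword occurs inside the 300-char window at i iff it has a full match position inside it
lemma window_iff (cs kl : List Char) (i : Int) (h0 : 0 ≤ i) (h3 : i + 300 ≤ (cs.length : Int)) :
    (PySem.Chars.isIn kl (List.take 300 (List.drop i.toNat cs)) = true) ↔
    ∃ p : Int, (0 ≤ p ∧ p < (cs.length : Int) - (kl.length : Int) + 1) ∧
      kl <+: cs.drop p.toNat ∧ i ≤ p ∧ p + (kl.length : Int) ≤ i + 300 := by
  rw [← PySem.Chars.exists_prefix_drop_iff_isIn]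
  constructor
  · rintro ⟨j, hj⟩
    rw [List.drop_take, List.drop_drop, List.prefix_take_iff] at hj
    obtain ⟨hpre, hlen⟩ := hj
    by_cases hkl : kl = []
    · subst hkl
      exact ⟨i, ⟨h0, by simp; omega⟩, by simp, le_refl _, by simp⟩
    · have hklpos : 0 < kl.length := List.length_pos_iff.mpr hkl
      have hdl : kl.length ≤ cs.length - (i.toNat + j) := by
        simpa using hpre.length_le
      refine ⟨i + (j : Int), ⟨by omega, ?_⟩, ?_, by omega, ?_⟩
      · have hcs : i.toNat + j + kl.length ≤ cs.length := by omega
        omega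
      · have : (i + (j : Int)).toNat = i.toNat + j := by omega
        rw [this]; exact hpre
      · omega
  · rintro ⟨p, ⟨hp0, hpn⟩, hpre, hip, hfit⟩
    refine ⟨p.toNat - i.toNat, ?_⟩
    rw [List.drop_take, List.drop_drop, List.prefix_take_iff]
    have hidx : i.toNat + (p.toNat - i.toNat) = p.toNat := by omega
    rw [hidx]
    exact ⟨hpre, by omega⟩

set_option maxHeartbeats 2000000 in
lemma create_evidence_excerpt_py_eq (content : String) (query_context : String) :
    create_evidence_excerpt_py content query_context
      = create_evidence_excerpt_py_alt content query_context := by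
  unfold create_evidence_excerpt_py create_evidence_excerpt_py_alt
  by_cases h1 : content.toList.isEmpty
  · simp only [h1, if_true]
  · simp only [h1]
    by_cases h2 : PySem.Str.len content ≤ 300
    · simp only [h2, if_true]
    · simp only [h2, if_false]
      have hfold : (PySem.List.pyRange 0 (PySem.Str.len content - 300) 50).foldl
          (fun (st : Int × Int) i =>
            let excerpt := PySem.Str.lower (PySem.Str.slice content (some i) (some (i + 300)))
            let nmatches := ((PySem.Str.split₀ (PySem.Str.lower query_context)).map
              (fun kw => if PySem.Str.isIn kw excerpt then (1 : Int) else 0)).sum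
            if nmatches > st.2 then (i, nmatches) else st) (0, 0)
          = (PySem.List.pyRange 0 (PySem.Str.len content - 300) 50).foldl
          (fun (st : Int × Int) i =>
            let m := ((PySem.Str.split₀ (PySem.Str.lower query_context)).map (fun kw =>
              if (((PySem.Str.split₀ (PySem.Str.lower query_context)).foldl
                    (fun d kw => if d.contains kw then d
                      else d.insert kw (pyMatchPositions (PySem.Str.lower content) kw))
                    PySem.Dict.empty).getD kw []).any
                  (fun p => decide (i ≤ p) && decide (p + PySem.Str.len kw ≤ i + 300))
                then (1 : Int) else 0)).sum
            if m > st.2 then (i, m) else st) (0, 0) := by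
        apply PySem.List.foldl_congr_mem
        intro acc i hi
        have hmem := (PySem.List.mem_pyRange_iff_of_pos (by norm_num) i).mp hi
        obtain ⟨hi0, hilt, -⟩ := hmem
        have hmatch : ((PySem.Str.split₀ (PySem.Str.lower query_context)).map
            (fun kw => if PySem.Str.isIn kw
                (PySem.Str.lower (PySem.Str.slice content (some i) (some (i + 300)))) then (1 : Int) else 0)).sum
            = ((PySem.Str.split₀ (PySem.Str.lower query_context)).map (fun kw =>
              if (((PySem.Str.split₀ (PySem.Str.lower query_context)).foldl
                    (fun d kw => if d.contains kw then d
                      else d.insert kw (pyMatchPositions (PySem.Str.lower content) kw))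
                    PySem.Dict.empty).getD kw []).any
                  (fun p => decide (i ≤ p) && decide (p + PySem.Str.len kw ≤ i + 300))
                then (1 : Int) else 0)).sum := by
          refine congrArg List.sum (List.map_congr_left ?_)
          intro kw hkw
          -- the index lookup is the match-position list
          have hidx : (((PySem.Str.split₀ (PySem.Str.lower query_context)).foldl
                (fun d kw => if d.contains kw then d
                  else d.insert kw (pyMatchPositions (PySem.Str.lower content) kw))
                PySem.Dict.empty).getD kw []) = pyMatchPositions (PySem.Str.lower content) kw := by
            apply idx_getD
            · intro k hk; simp [PySem.Dict.contains_empty] at hk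
            · exact idx_contains _ _ _ _ (Or.inl hkw)
          rw [hidx]
          -- reduce A's window test to the list level
          have hcs : (PySem.Str.lower (PySem.Str.slice content (some i) (some (i + 300)))).toList
              = List.take 300 (List.drop i.toNat (PySem.Chars.lower content.toList)) := by
            rw [PySem.Str.toList_lower, PySem.Str.toList_slice, PySem.Chars.slice]
            rw [show (some i : Option Int) = some ((i.toNat : Nat) : Int) from by
              rw [Int.toNat_of_nonneg hi0]]
            rw [show (some (i + 300) : Option Int) = some ((i.toNat + 300 : Nat) : Int) from by
              push_cast; rw [Int.toNat_of_nonneg hi0]]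
            rw [PySem.List.slice_natCast]
            rw [show i.toNat + 300 - i.toNat = 300 from by omega]
            rw [PySem.Chars.lower, PySem.Chars.lower, List.map_take, List.map_drop]
          have hlen : ((PySem.Chars.lower content.toList).length : Int) = PySem.Str.len content := by
            rw [PySem.Chars.lower, List.length_map, PySem.Str.len]
          have h300 : i + 300 ≤ ((PySem.Chars.lower content.toList).length : Int) := by
            rw [hlen]; omega
          have key : PySem.Str.isIn kw
              (PySem.Str.lower (PySem.Str.slice content (some i) (some (i + 300))))
              = (pyMatchPositions (PySem.Str.lower content) kw).any
                (fun p => decide (i ≤ p) && decide (p + PySem.Str.len kw ≤ i + 300)) := by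
            rw [Bool.eq_iff_iff]
            rw [show PySem.Str.isIn kw (PySem.Str.lower (PySem.Str.slice content (some i) (some (i + 300))))
                = PySem.Chars.isIn kw.toList (List.take 300 (List.drop i.toNat (PySem.Chars.lower content.toList)))
              from by rw [PySem.Str.isIn, hcs]]
            rw [window_iff _ _ _ hi0 h300, List.any_eq_true]
            constructor
            · rintro ⟨p, ⟨hp0, hpn⟩, hpre, hip, hfit⟩
              refine ⟨p, ?_, ?_⟩
              · rw [pyMatchPositions, List.mem_filter]
                refine ⟨PySem.List.mem_pyRange_one.mpr ⟨hp0, ?_⟩, ?_⟩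
                · have h1' := hpn
                  rw [PySem.Chars.lower, List.length_map] at h1'
                  simp only [PySem.Str.len, PySem.Str.toList_lower, PySem.Chars.lower,
                    List.length_map]
                  omega
                · rw [PySem.Chars.startswith, PySem.Str.toList_lower]
                  exact List.isPrefixOf_iff_prefix.mpr hpre
              · simp only [Bool.and_eq_true, decide_eq_true_eq]
                rw [PySem.Str.len]
                exact ⟨hip, hfit⟩
            · rintro ⟨p, hpmem, hcond⟩
              rw [pyMatchPositions, List.mem_filter] at hpmem
              obtain ⟨hpr, hpsw⟩ := hpmem
              obtain ⟨hp0, hpn⟩ := PySem.List.mem_pyRange_one.mp hpr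
              simp only [Bool.and_eq_true, decide_eq_true_eq] at hcond
              rw [PySem.Str.len] at hcond
              refine ⟨p, ⟨hp0, ?_⟩, ?_, hcond.1, hcond.2⟩
              · have h1' := hpn
                simp only [PySem.Str.len, PySem.Str.toList_lower, PySem.Chars.lower,
                  List.length_map] at h1'
                rw [PySem.Chars.lower, List.length_map]
                omega
              · rw [PySem.Chars.startswith, PySem.Str.toList_lower] at hpsw
                exact List.isPrefixOf_iff_prefix.mp hpsw
          simp only [key]
        simp only [hmatch]
      simp only [hfold]

-- ===== VERDICT (by name: the statement is the Claim_ definition above) =====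
theorem create_evidence_excerpt_py_spec : Claim_equal_create_evidence_excerpt_py := by
  intro content query_context _dom
  unfold Spec_create_evidence_excerpt_py
  exact create_evidence_excerpt_py_eq content query_context
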